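-- pv_equiv track=rewrite | github.com/Coding-Badly/RFID-KeyMaster | utils/superglob.py | clean_stem_to_simple_environment_variable
-- ===== SOURCE A (Python) =====
-- def clean_stem_to_simple_environment_variable(stem):
--     """Change a filename stem to be a clean environment variable.
--     """
--     rv = ''
--     for ch in stem:
--         if 'A' <= ch <= 'Z':
--             rv += ch
--         elif 'a' <= ch <= 'z':
--             rv += chr(ord(ch)-ord('a')+ord('A'))
--         else:
--             rv += '_'
--     return rv
-- ===== SOURCE B (Python) =====
-- import re
--
-- def clean_stem_to_simple_environment_variable(stem):
--     """Change a filename stem to be a clean environment variable.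
--     """
--     return re.sub('[^A-Za-z]', '_', stem).upper()
-- ===== Notes on version B (the rewrite author's own statement) =====
-- stated objective: idiomatic
-- what changed: Replaces the per-character three-way branch with manual ord/chr arithmetic by two whole-string passes: a regex substitution mapping every non-ASCII-letter to an underscore, followed by str.upper().
import Mathlib
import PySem

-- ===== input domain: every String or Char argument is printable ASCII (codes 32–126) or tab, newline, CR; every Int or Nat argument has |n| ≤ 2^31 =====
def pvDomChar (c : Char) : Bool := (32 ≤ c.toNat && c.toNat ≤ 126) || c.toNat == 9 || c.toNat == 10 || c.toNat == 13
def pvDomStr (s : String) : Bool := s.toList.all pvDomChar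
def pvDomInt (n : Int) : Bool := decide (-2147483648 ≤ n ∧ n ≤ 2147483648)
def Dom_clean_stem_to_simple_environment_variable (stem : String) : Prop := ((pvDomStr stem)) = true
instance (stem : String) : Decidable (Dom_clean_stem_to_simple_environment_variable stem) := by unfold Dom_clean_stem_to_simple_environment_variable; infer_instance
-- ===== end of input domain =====

-- B (idiomatic, measured faster by a constant factor: C-level re.sub/str.upper instead of a Python char loop) does two whole-string passes: replace non-letters with underscore, then uppercase.
-- replace every non-ASCII-letter by '_' (re.sub, ported per-character since the
-- class [^A-Za-z] matches single characters), then uppercase the whole string.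


-- ===== PORT A =====
def clean_stem_to_simple_environment_variable (stem : String) : String :=
  String.ofList (stem.toList.foldl (fun rv ch =>
    if 'A' ≤ ch ∧ ch ≤ 'Z' then rv ++ [ch]
    else if 'a' ≤ ch ∧ ch ≤ 'z' then rv ++ [Char.ofNat (ch.toNat - 'a'.toNat + 'A'.toNat)]
    else rv ++ ['_']) [])

-- ===== PORT B =====
-- re.sub('[^A-Za-z]', '_', stem) ported by hand as a per-character map (exact: the
-- character class matches exactly one character), then PySem.Str.upper = str.upper().
def clean_stem_to_simple_environment_variable_alt (stem : String) : String :=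
  PySem.Str.upper (String.ofList (stem.toList.map (fun ch =>
    if ('A' ≤ ch ∧ ch ≤ 'Z') ∨ ('a' ≤ ch ∧ ch ≤ 'z') then ch else '_')))

-- ===== PRECONDITION & SPEC =====
def Spec_clean_stem_to_simple_environment_variable (stem : String) (out : String) : Prop := out = clean_stem_to_simple_environment_variable_alt stem
instance (stem : String) (out : String) : Decidable (Spec_clean_stem_to_simple_environment_variable stem out) := by unfold Spec_clean_stem_to_simple_environment_variable; infer_instance

-- ===== CLAIM (what is proved, stated in full; the proofs are below) =====
def Claim_equal_clean_stem_to_simple_environment_variable : Prop := ∀ (stem : String), Dom_clean_stem_to_simple_environment_variable stem → Spec_clean_stem_to_simple_environment_variable stem (clean_stem_to_simple_environment_variable stem)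

-- ===== LEMMAS AND PROOFS =====

-- A's accumulator loop is acc ++ map of the per-character translation.
theorem pvFoldA (l : List Char) (acc : List Char) :
    l.foldl (fun rv ch =>
      if 'A' ≤ ch ∧ ch ≤ 'Z' then rv ++ [ch]
      else if 'a' ≤ ch ∧ ch ≤ 'z' then rv ++ [Char.ofNat (ch.toNat - 'a'.toNat + 'A'.toNat)]
      else rv ++ ['_']) acc
    = acc ++ l.map (fun ch =>
      if 'A' ≤ ch ∧ ch ≤ 'Z' then ch
      else if 'a' ≤ ch ∧ ch ≤ 'z' then Char.ofNat (ch.toNat - 'a'.toNat + 'A'.toNat)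
      else '_') := by
  induction l generalizing acc with
  | nil => simp
  | cons c t ih => simp only [List.foldl, List.map]; split_ifs <;> rw [ih] <;> simp

-- per character, A's translation = upperChar ∘ (B's replacement)
theorem pvCharStep (ch : Char) :
    (if 'A' ≤ ch ∧ ch ≤ 'Z' then ch
     else if 'a' ≤ ch ∧ ch ≤ 'z' then Char.ofNat (ch.toNat - 'a'.toNat + 'A'.toNat)
     else '_')
    = PySem.Chars.upperChar
        (if ('A' ≤ ch ∧ ch ≤ 'Z') ∨ ('a' ≤ ch ∧ ch ≤ 'z') then ch else '_') := by
  have hle : ∀ a b : Char, a ≤ b ↔ a.toNat ≤ b.toNat := fun a b => Iff.rfl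
  simp only [PySem.Chars.upperChar, PySem.Chars.islower, Bool.and_eq_true, decide_eq_true_eq]
  by_cases hU : 'A' ≤ ch ∧ ch ≤ 'Z'
  · rw [if_pos hU, if_pos (Or.inl hU), if_neg]
    intro hlow
    have h1 : ch.toNat ≤ 90 := (hle ch 'Z').mp hU.2
    have h2 : 97 ≤ ch.toNat := (hle 'a' ch).mp hlow.1
    omega
  · rw [if_neg hU]
    by_cases hL : 'a' ≤ ch ∧ ch ≤ 'z'
    · rw [if_pos hL, if_pos (Or.inr hL), if_pos hL]
      congr 1
      have h2 : 97 ≤ ch.toNat := (hle 'a' ch).mp hL.1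
      show ch.toNat - 97 + 65 = ch.toNat - 32
      omega
    · rw [if_neg hL,
        if_neg (show ¬(('A' ≤ ch ∧ ch ≤ 'Z') ∨ ('a' ≤ ch ∧ ch ≤ 'z')) from fun h => h.elim hU hL),
        if_neg]
      intro h
      exact absurd ((hle 'a' '_').mp h.1) (by decide)

-- ===== VERDICT (by name: the statement is the Claim_ definition above) =====
theorem clean_stem_to_simple_environment_variable_spec : Claim_equal_clean_stem_to_simple_environment_variable := by
  intro stem _
  unfold Spec_clean_stem_to_simple_environment_variable
  unfold clean_stem_to_simple_environment_variable clean_stem_to_simple_environment_variable_alt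
  simp only [PySem.Str.upper, PySem.Chars.upper, String.toList_ofList, List.map_map,
    pvFoldA, List.nil_append]
  exact congrArg String.ofList (List.map_congr_left fun ch _ => pvCharStep ch)
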